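-- pv_equiv track=rewrite | github.com/furuse-kazufumi/llive | src/llive/oka/essence.py | _list_candidates
-- ===== SOURCE A (Python) =====
-- def _list_candidates(text: str, triggers: tuple[str, ...], limit: int = 3) -> tuple[str, ...]:
--     """For each matched trigger, capture a short context window as a candidate."""
--     out: list[str] = []
--     low = text.lower()
--     for trigger in triggers:
--         idx = low.find(trigger.lower())
--         if idx < 0:
--             continue
--         start = max(0, idx - 12)
--         end = min(len(text), idx + len(trigger) + 24)
--         snippet = text[start:end].strip()
--         if snippet and snippet not in out:
--             out.append(snippet)
--         if len(out) >= limit: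
--             break
--     return tuple(out)
-- ===== SOURCE B (Python) =====
-- def _list_candidates(text: str, triggers: tuple[str, ...], limit: int = 3) -> tuple[str, ...]:
--     """Single simultaneous left-to-right scan of the text finds the first
--     occurrence of every distinct lowered trigger at once: pending triggers are
--     grouped by length in hash sets, and each text position looks up one slice
--     per pending length. Snippets are then built per trigger from that table."""
--     low = text.lower()
--     lows = [t.lower() for t in triggers]
--     first: dict[str, int] = {}
--     pending: dict[int, set[str]] = {}
--     for t in dict.fromkeys(lows):
--         if t:
--             pending.setdefault(len(t), set()).add(t)
--         else:
--             first[t] = 0  # the empty trigger is found at 0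
--     for i in range(len(low)):
--         for length, group in pending.items():
--             seg = low[i:i + length]
--             if seg in group:
--                 first[seg] = i
--                 group.discard(seg)
--     out: list[str] = []
--     for trigger, tl in zip(triggers, lows):
--         if tl not in first:
--             continue
--         idx = first[tl]
--         start = max(0, idx - 12)
--         end = min(len(text), idx + len(tl) + 24)
--         snippet = text[start:end].strip()
--         if snippet and snippet not in out:
--             out.append(snippet)
--         if len(out) >= limit:
--             break
--     return tuple(out)
-- ===== Notes on version B (the rewrite author's own statement) =====
-- stated objective: alternative
-- what changed: Replaces A's per-trigger low.find() searches by one left-to-right scan of the text: pending lowered triggers are grouped by length in hash sets, each position looks up one slice per pending length, and every trigger's first occurrence lands in a dict the snippet loop then reads.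
import Mathlib
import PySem

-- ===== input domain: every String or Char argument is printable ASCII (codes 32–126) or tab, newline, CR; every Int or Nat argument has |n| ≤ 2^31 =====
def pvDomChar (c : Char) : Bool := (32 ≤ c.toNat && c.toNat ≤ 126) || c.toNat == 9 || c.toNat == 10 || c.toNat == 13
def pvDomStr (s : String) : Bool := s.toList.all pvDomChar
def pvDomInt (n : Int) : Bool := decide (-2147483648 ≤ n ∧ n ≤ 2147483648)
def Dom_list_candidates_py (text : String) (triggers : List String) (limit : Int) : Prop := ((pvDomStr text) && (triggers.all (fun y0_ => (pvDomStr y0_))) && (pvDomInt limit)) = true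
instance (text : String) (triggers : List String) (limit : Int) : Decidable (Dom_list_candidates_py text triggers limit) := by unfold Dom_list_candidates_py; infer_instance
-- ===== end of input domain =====

-- B replaces A's per-trigger low.find() searches by one simultaneous left-to-right scan of the
-- text (pending lowered triggers grouped by length, one slice lookup per pending length and
-- position) that records every trigger's first occurrence in a dict (alternative algorithm).


-- ===== PORT A =====
-- A's 'for trigger in triggers' loop, with 'out' as the accumulator; break = early return
def pvALoop (text low : String) (limit : Int) : List String → List String → List String
  | [], out => out
  | trigger :: rest, out =>
    let idx := PySem.Str.find low (PySem.Str.lower trigger)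
    if idx < 0 then pvALoop text low limit rest out
    else
      let start := max 0 (idx - 12)
      let stop := min (PySem.Str.len text) (idx + PySem.Str.len trigger + 24)
      let snippet := PySem.Str.strip (PySem.Str.slice text (some start) (some stop))
      let out' := if snippet ≠ "" ∧ snippet ∉ out then out ++ [snippet] else out
      if limit ≤ PySem.List.len out' then out' else pvALoop text low limit rest out'

def list_candidates_py (text : String) (triggers : List String) (limit : Int) : List String :=
  pvALoop text (PySem.Str.lower text) limit triggers []


-- ===== PORT B =====
-- the slice low[i:i+length] B looks up at position i

def pvSeg (low : String) (i : Nat) (K : Int) : String :=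
  PySem.Str.slice low (some (i : Int)) (some ((i : Int) + K))


-- B's grouping pass: pending[len(t)] is the set (distinct list; input is deduplicated) of
-- not-yet-found lowered triggers of that length; the empty trigger is found at 0 directly
def pvBInit (lowsD : List String) : PySem.Dict Int (List String) × PySem.Dict String Int :=
  lowsD.foldl
    (fun acc t =>
      if t ≠ "" then (acc.1.modify (PySem.Str.len t) [] (fun g => g ++ [t]), acc.2)
      else (acc.1, acc.2.insert t 0))
    (PySem.Dict.empty, PySem.Dict.empty)


-- body of B's 'for length, group in pending.items()': low[i:i+length] is looked up in the
-- group; a hit records position i in first and is discarded from its group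

def pvBStepF (low : String) (i : Nat) :
    PySem.Dict Int (List String) × PySem.Dict String Int → Int × List String →
    PySem.Dict Int (List String) × PySem.Dict String Int :=
  fun acc p =>
    if pvSeg low i p.1 ∈ p.2 then
      (acc.1.insert p.1 (p.2.erase (pvSeg low i p.1)), acc.2.insert (pvSeg low i p.1) (i : Int))
    else acc


def pvBStep (low : String) (i : Nat) (pending : PySem.Dict Int (List String))
    (first : PySem.Dict String Int) :
    PySem.Dict Int (List String) × PySem.Dict String Int :=
  pending.items.foldl (pvBStepF low i) (pending, first)

-- B's 'for i in range(len(low))' loop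
def pvBScan (low : String) (i : Nat) (pending : PySem.Dict Int (List String))
    (first : PySem.Dict String Int) : PySem.Dict String Int :=
  if low.toList.length ≤ i then first
  else
    let st := pvBStep low i pending first
    pvBScan low (i + 1) st.1 st.2
termination_by low.toList.length - i
decreasing_by omega



-- B's second loop, over zip(triggers, lows)
def pvBLoop (text : String) (first : PySem.Dict String Int) (limit : Int) :
    List (String × String) → List String → List String
  | [], out => out
  | (_, tl) :: rest, out =>
    match first.get? tl with
    | none => pvBLoop text first limit rest out
    | some idx =>
      let start := max 0 (idx - 12)
      let stop := min (PySem.Str.len text) (idx + PySem.Str.len tl + 24)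
      let snippet := PySem.Str.strip (PySem.Str.slice text (some start) (some stop))
      let out' := if snippet ≠ "" ∧ snippet ∉ out then out ++ [snippet] else out
      if limit ≤ PySem.List.len out' then out' else pvBLoop text first limit rest out'

def list_candidates_py_alt (text : String) (triggers : List String) (limit : Int) : List String :=
  let low := PySem.Str.lower text
  let lows := triggers.map (fun t => PySem.Str.lower t)
  let init := pvBInit (PySem.List.dedup lows)
  let first := pvBScan low 0 init.1 init.2
  pvBLoop text first limit (triggers.zip lows) []


-- ===== PRECONDITION & SPEC =====
def Spec_list_candidates_py (text : String) (triggers : List String) (limit : Int) (out : List String) : Prop := out = list_candidates_py_alt text triggers limit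
instance (text : String) (triggers : List String) (limit : Int) (out : List String) : Decidable (Spec_list_candidates_py text triggers limit out) := by unfold Spec_list_candidates_py; infer_instance

-- ===== CLAIM (what is proved, stated in full; the proofs are below) =====
def Claim_equal_list_candidates_py : Prop := ∀ (text : String) (triggers : List String) (limit : Int), Dom_list_candidates_py text triggers limit → Spec_list_candidates_py text triggers limit (list_candidates_py text triggers limit)


-- ===== LEMMAS AND PROOFS =====


theorem find_nonneg_of_ne_neg_one (low tl : List Char) (h : PySem.Chars.find low tl ≠ -1) :
    0 ≤ PySem.Chars.find low tl := by
  have := PySem.Chars.findFrom_natCast_spec low tl 0 (by omega)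
  simp only [Nat.cast_zero, PySem.Chars.findFrom_zero] at this
  exact_mod_cast (this h).1

-- Chars.find is the least matching position …
theorem find_eq_of_minimal (low tl : List Char) (i : Nat)
    (hi : tl <+: List.drop i low) (hmin : ∀ j < i, ¬ tl <+: List.drop j low) :
    PySem.Chars.find low tl = (i : Int) := by
  have hne : PySem.Chars.find low tl ≠ -1 := by
    rw [PySem.Chars.find_ne_neg_one_iff]
    exact (PySem.Chars.isIn_iff_infix tl low).1
      ((PySem.Chars.exists_prefix_drop_iff_isIn tl low).1 ⟨i, hi⟩)
  have hspec := PySem.Chars.findFrom_natCast_spec low tl 0 (by omega)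
  simp only [Nat.cast_zero, PySem.Chars.findFrom_zero] at hspec
  obtain ⟨hge, hpref, hminN⟩ := hspec hne
  have h0 : 0 ≤ PySem.Chars.find low tl := by exact_mod_cast hge
  set N := (PySem.Chars.find low tl).toNat with hN
  have : N = i := by
    rcases Nat.lt_trichotomy N i with hlt | heq | hgt
    · exact absurd hpref (hmin N hlt)
    · exact heq
    · exact absurd hi (hminN i (by omega) hgt)
  omega

-- … and -1 iff there is no matching position
theorem find_eq_neg_one_of_none (low tl : List Char) (h : ∀ j, ¬ tl <+: List.drop j low) :
    PySem.Chars.find low tl = -1 := by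
  rw [PySem.Chars.find_eq_neg_one_iff]
  intro hinf
  rcases (PySem.Chars.exists_prefix_drop_iff_isIn tl low).2
      ((PySem.Chars.isIn_iff_infix tl low).2 hinf) with ⟨j, hj⟩
  exact h j hj

theorem find_empty (l : List Char) : PySem.Chars.find l [] = 0 := by
  have := find_eq_of_minimal l [] 0 List.nil_prefix (fun j hj => absurd hj (by omega))
  simpa using this



theorem pvBStepF_fold_fst (low : String) (i : Nat) :
    ∀ (ps : List (Int × List String)) (P : PySem.Dict Int (List String))
      (F : PySem.Dict String Int),
    (ps.map Prod.fst).Nodup → (∀ p ∈ ps, P.getD p.1 [] = p.2) →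
    ∀ K, ((ps.foldl (pvBStepF low i) (P, F)).1).getD K [] =
      if K ∈ ps.map Prod.fst ∧ pvSeg low i K ∈ P.getD K []
      then (P.getD K []).erase (pvSeg low i K) else P.getD K [] := by
  intro ps
  induction ps with
  | nil => intro P F _ _ K; simp
  | cons p ps ih =>
    obtain ⟨L, s⟩ := p
    intro P F hnd hsnap K
    have hs : P.getD L [] = s := hsnap (L, s) List.mem_cons_self
    obtain ⟨hLnot, hndtail⟩ := List.nodup_cons.mp hnd
    by_cases hseg : pvSeg low i L ∈ s
    · have hstep : pvBStepF low i (P, F) (L, s) =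
          (P.insert L (s.erase (pvSeg low i L)), F.insert (pvSeg low i L) (i : Int)) := by
        simp only [pvBStepF]
        rw [if_pos hseg]
      have hsnap' : ∀ q ∈ ps, (P.insert L (s.erase (pvSeg low i L))).getD q.1 [] = q.2 := by
        intro q hq
        have hq1 : q.1 ∈ ps.map Prod.fst := List.mem_map_of_mem hq
        have hqne : ¬ q.1 = L := by
          intro h
          rw [h] at hq1
          exact hLnot hq1
        rw [PySem.Dict.getD_insert, if_neg hqne]
        exact hsnap q (List.mem_cons_of_mem _ hq)
      rw [List.foldl_cons, hstep, ih _ _ hndtail hsnap' K]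
      by_cases hKL : K = L
      · subst hKL
        simp [PySem.Dict.getD_insert, hLnot, hs, hseg]
      · rw [PySem.Dict.getD_insert, if_neg hKL]
        have hiff : (K ∈ ((L, s) :: ps).map Prod.fst ∧ pvSeg low i K ∈ P.getD K []) ↔
            (K ∈ ps.map Prod.fst ∧ pvSeg low i K ∈ P.getD K []) := by
          simp [List.mem_cons, hKL]
        rw [if_congr hiff rfl rfl]
    · have hstep : pvBStepF low i (P, F) (L, s) = (P, F) := by
        simp only [pvBStepF]
        rw [if_neg hseg]
      rw [List.foldl_cons, hstep,
        ih _ _ hndtail (fun q hq => hsnap q (List.mem_cons_of_mem _ hq)) K]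
      by_cases hKL : K = L
      · subst hKL
        have h1 : ¬ (K ∈ ps.map Prod.fst ∧ pvSeg low i K ∈ P.getD K []) :=
          fun h => hLnot h.1
        have h2 : ¬ (K ∈ ((K, s) :: ps).map Prod.fst ∧ pvSeg low i K ∈ P.getD K []) := by
          rw [hs]; exact fun h => hseg h.2
        rw [if_neg h1, if_neg h2]
      · have hiff : (K ∈ ((L, s) :: ps).map Prod.fst ∧ pvSeg low i K ∈ P.getD K []) ↔
            (K ∈ ps.map Prod.fst ∧ pvSeg low i K ∈ P.getD K []) := by
          simp [List.mem_cons, hKL]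
        rw [if_congr hiff rfl rfl]

theorem pvBStepF_fold_snd (low : String) (i : Nat) :
    ∀ (ps : List (Int × List String)) (P : PySem.Dict Int (List String))
      (F : PySem.Dict String Int) (t : String),
    ((ps.foldl (pvBStepF low i) (P, F)).2).get? t =
      if ∃ p ∈ ps, pvSeg low i p.1 = t ∧ t ∈ p.2 then some (i : Int) else F.get? t := by
  intro ps
  induction ps with
  | nil => intro P F t; simp
  | cons p ps ih =>
    obtain ⟨L, s⟩ := p
    intro P F t
    by_cases hseg : pvSeg low i L ∈ s
    · have hstep : pvBStepF low i (P, F) (L, s) =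
          (P.insert L (s.erase (pvSeg low i L)), F.insert (pvSeg low i L) (i : Int)) := by
        simp only [pvBStepF]
        rw [if_pos hseg]
      rw [List.foldl_cons, hstep, ih]
      by_cases hex : ∃ p ∈ ps, pvSeg low i p.1 = t ∧ t ∈ p.2
      · rw [if_pos hex, if_pos ⟨_, List.mem_cons_of_mem _ hex.choose_spec.1,
          hex.choose_spec.2⟩]
      · rw [if_neg hex, PySem.Dict.get?_insert]
        by_cases hts : t = pvSeg low i L
        · rw [if_pos hts]
          rw [if_pos ⟨(L, s), List.mem_cons_self, hts.symm, hts ▸ hseg⟩]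
        · rw [if_neg hts]
          rw [if_neg ?_]
          rintro ⟨q, hq, hqt, hqmem⟩
          rcases List.mem_cons.mp hq with rfl | hq'
          · exact hts hqt.symm
          · exact hex ⟨q, hq', hqt, hqmem⟩
    · have hstep : pvBStepF low i (P, F) (L, s) = (P, F) := by
        simp only [pvBStepF]
        rw [if_neg hseg]
      rw [List.foldl_cons, hstep, ih]
      by_cases hex : ∃ p ∈ ps, pvSeg low i p.1 = t ∧ t ∈ p.2
      · rw [if_pos hex, if_pos ⟨_, List.mem_cons_of_mem _ hex.choose_spec.1, hex.choose_spec.2⟩]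
      · rw [if_neg hex, if_neg ?_]
        rintro ⟨q, hq, hqt, hqmem⟩
        rcases List.mem_cons.mp hq with rfl | hq'
        · exact hseg (hqt ▸ hqmem)
        · exact hex ⟨q, hq', hqt, hqmem⟩

theorem pvBStepF_fold_keys (low : String) (i : Nat) :
    ∀ (ps : List (Int × List String)) (P : PySem.Dict Int (List String))
      (F : PySem.Dict String Int),
    P.keys.Nodup → ((ps.foldl (pvBStepF low i) (P, F)).1).keys.Nodup := by
  intro ps
  induction ps with
  | nil => intro P F h; exact h
  | cons p ps ih =>
    intro P F h
    rw [List.foldl_cons]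
    by_cases hseg : pvSeg low i p.1 ∈ p.2
    · have hstep : pvBStepF low i (P, F) p =
          (P.insert p.1 (p.2.erase (pvSeg low i p.1)),
           F.insert (pvSeg low i p.1) (i : Int)) := by
        simp only [pvBStepF]
        rw [if_pos hseg]
      rw [hstep]
      exact ih _ _ (PySem.Dict.nodup_keys_insert _ _ _ h)
    · have hstep : pvBStepF low i (P, F) p = (P, F) := by
        simp only [pvBStepF]
        rw [if_neg hseg]
      rw [hstep]
      exact ih _ _ h


-- snapshot property: every item of a key-distinct dict reads back via getD
theorem dict_snapshot (P : PySem.Dict Int (List String)) (hk : P.keys.Nodup) :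
    ∀ p ∈ P.items, P.getD p.1 [] = p.2 := by
  intro p hp
  obtain ⟨k, v⟩ := p
  exact PySem.Dict.getD_of_mem_items _ hp hk []

theorem items_keys_nodup (P : PySem.Dict Int (List String)) (hk : P.keys.Nodup) :
    (P.items.map Prod.fst).Nodup := hk


theorem pvSeg_eq_iff_prefix (low : String) (i : Nat) (t : String) :
    pvSeg low i ((t.toList.length : Int)) = t ↔ t.toList <+: low.toList.drop i := by
  unfold pvSeg
  rw [← String.toList_inj, PySem.Str.toList_slice, PySem.Chars.slice_eq_listSlice,
    PySem.List.slice_natCast_add, List.prefix_iff_eq_take]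
  exact eq_comm

-- a string in no group is never recorded by the scan
set_option maxHeartbeats 1000000 in
theorem pvBScan_not_mem (low : String) (t : String) :
    ∀ (n i : Nat) (pending : PySem.Dict Int (List String)) (first : PySem.Dict String Int),
    low.toList.length - i ≤ n → pending.keys.Nodup → (∀ L, t ∉ pending.getD L []) →
    (pvBScan low i pending first).get? t = first.get? t := by
  intro n
  induction n with
  | zero =>
    intro i pending first hn _ _
    rw [pvBScan, if_pos (by omega)]
  | succ n ih =>
    intro i pending first hn hk hno
    by_cases hstop : low.toList.length ≤ i
    · rw [pvBScan, if_pos hstop]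
    · rw [pvBScan, if_neg hstop]
      have hsnap := dict_snapshot pending hk
      have hkeys := items_keys_nodup pending hk
      rw [ih (i + 1) _ _ (by omega) ?_ ?_]
      · unfold pvBStep
        rw [pvBStepF_fold_snd, if_neg ?_]
        rintro ⟨q, hq, hqt, hqmem⟩
        exact hno q.1 (hsnap q hq ▸ hqmem)
      · exact pvBStepF_fold_keys low i _ _ _ hk
      · intro L
        unfold pvBStep
        rw [pvBStepF_fold_fst low i _ _ _ hkeys hsnap L]
        split
        · exact fun hmem => hno L (List.mem_of_mem_erase hmem)
        · exact hno L

-- the scan computes the first occurrence of every pending (nonempty) trigger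
set_option maxHeartbeats 1000000 in
theorem pvBScan_get? (low : String) (t : String) (ht : t.toList ≠ []) :
    ∀ (n i : Nat) (pending : PySem.Dict Int (List String)) (first : PySem.Dict String Int),
    low.toList.length - i ≤ n →
    pending.keys.Nodup → (∀ L, (pending.getD L []).Nodup) →
    t ∈ pending.getD ((t.toList.length : Int)) [] →
    (∀ L, L ≠ ((t.toList.length : Int)) → t ∉ pending.getD L []) →
    first.get? t = none →
    (∀ j < i, ¬ t.toList <+: low.toList.drop j) →
    (pvBScan low i pending first).get? t =
      if PySem.Chars.find low.toList t.toList = -1 then none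
      else some (PySem.Chars.find low.toList t.toList) := by
  intro n
  induction n with
  | zero =>
    intro i pending first hn hk hvnd hK honly hnone hpre
    have hfind : PySem.Chars.find low.toList t.toList = -1 := by
      apply find_eq_neg_one_of_none
      intro j hj
      by_cases hji : j < i
      · exact hpre j hji hj
      · rw [List.drop_eq_nil_of_le (by omega)] at hj
        exact ht (List.prefix_nil.mp hj)
    rw [pvBScan, if_pos (by omega)]
    simp [hfind, hnone]
  | succ n ih =>
    intro i pending first hn hk hvnd hK honly hnone hpre
    by_cases hstop : low.toList.length ≤ i
    · have hfind : PySem.Chars.find low.toList t.toList = -1 := by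
        apply find_eq_neg_one_of_none
        intro j hj
        by_cases hji : j < i
        · exact hpre j hji hj
        · rw [List.drop_eq_nil_of_le (by omega)] at hj
          exact ht (List.prefix_nil.mp hj)
      rw [pvBScan, if_pos hstop]
      simp [hfind, hnone]
    · rw [pvBScan, if_neg hstop]
      have hsnap := dict_snapshot pending hk
      have hkeys := items_keys_nodup pending hk
      have hKitem : ((t.toList.length : Int), pending.getD ((t.toList.length : Int)) []) ∈
          pending.items := by
        rcases hg : pending.get? ((t.toList.length : Int)) with _ | v
        · exact absurd hK (by
            rw [PySem.Dict.getD_eq_get?_getD, hg]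
            simp)
        · have : pending.getD ((t.toList.length : Int)) [] = v := by
            rw [PySem.Dict.getD_eq_get?_getD, hg]; rfl
          rw [this]
          exact PySem.Dict.mem_items_of_get?_eq_some _ hg
      by_cases hm : pvSeg low i ((t.toList.length : Int)) = t
      · -- t is found at position i
        have hpref : t.toList <+: low.toList.drop i := (pvSeg_eq_iff_prefix low i t).1 hm
        have hfind : PySem.Chars.find low.toList t.toList = (i : Int) :=
          find_eq_of_minimal _ _ i hpref hpre
        rw [pvBScan_not_mem low t n (i + 1) _ _ (by omega) ?_ ?_]
        · unfold pvBStep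
          rw [pvBStepF_fold_snd, if_pos ⟨_, hKitem, hm, hK⟩, hfind]
          rw [if_neg (by omega)]
        · exact pvBStepF_fold_keys low i _ _ _ hk
        · intro L
          unfold pvBStep
          rw [pvBStepF_fold_fst low i _ _ _ hkeys hsnap L]
          by_cases hL : L = ((t.toList.length : Int))
          · subst hL
            rw [if_pos ⟨List.mem_map_of_mem hKitem, by rw [hm]; exact hK⟩, hm]
            exact List.Nodup.not_mem_erase (hvnd _)
          · split
            · exact fun hmem => honly L hL (List.mem_of_mem_erase hmem)
            · exact honly L hL
      · -- no occurrence of t at position i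
        have hnpref : ¬ t.toList <+: low.toList.drop i :=
          fun h => hm ((pvSeg_eq_iff_prefix low i t).2 h)
        apply ih (i + 1) _ _ (by omega)
        · exact pvBStepF_fold_keys low i _ _ _ hk
        · intro L
          unfold pvBStep
          rw [pvBStepF_fold_fst low i _ _ _ hkeys hsnap L]
          split
          · exact List.Nodup.erase _ (hvnd L)
          · exact hvnd L
        · unfold pvBStep
          rw [pvBStepF_fold_fst low i _ _ _ hkeys hsnap]
          split
          · exact (List.mem_erase_of_ne (fun h => hm h.symm)).mpr hK
          · exact hK
        · intro L hL
          unfold pvBStep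
          rw [pvBStepF_fold_fst low i _ _ _ hkeys hsnap]
          split
          · exact fun hmem => honly L hL (List.mem_of_mem_erase hmem)
          · exact honly L hL
        · unfold pvBStep
          rw [pvBStepF_fold_snd, if_neg ?_]
          · exact hnone
          · rintro ⟨q, hq, hqt, hqmem⟩
            have hmemq : t ∈ pending.getD q.1 [] := hsnap q hq ▸ hqmem
            by_cases hqK : q.1 = ((t.toList.length : Int))
            · exact hm (hqK ▸ hqt)
            · exact honly q.1 hqK hmemq
        · intro j hj
          by_cases hji : j < i
          · exact hpre j hji
          · have : j = i := by omega
            subst this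
            exact hnpref




-- the grouping pass, group side: groups collect the nonempty strings by length, in order
theorem pvBInit_fst :
    ∀ (l : List String) (B : PySem.Dict Int (List String)) (F : PySem.Dict String Int) (K : Int),
    ((l.foldl (fun acc t =>
        if t ≠ "" then (acc.1.modify (PySem.Str.len t) [] (fun g => g ++ [t]), acc.2)
        else (acc.1, acc.2.insert t 0)) (B, F)).1).getD K [] =
      B.getD K [] ++ l.filter (fun t => decide (t ≠ "" ∧ PySem.Str.len t = K)) := by
  intro l
  induction l with
  | nil => intro B F K; simp
  | cons t l ihl =>
    intro B F K
    by_cases hte : t = ""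
    · subst hte
      simp only [List.foldl_cons, ne_eq, not_true_eq_false, if_false, reduceIte, ihl]
      simp
    · simp only [List.foldl_cons, ne_eq, hte, not_false_eq_true, if_true, reduceIte, ihl]
      rw [PySem.Dict.getD_modify]
      by_cases hKt : K = PySem.Str.len t
      · rw [if_pos hKt]
        rw [List.filter_cons_of_pos (by simp [hte, hKt, PySem.Str.len_eq])]
        simp [hKt]
      · rw [if_neg hKt]
        rw [List.filter_cons_of_neg (by simp; intro _; exact fun h => hKt h.symm)]

-- the grouping pass, result side: only the empty trigger is pre-recorded (at 0)
theorem pvBInit_snd :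
    ∀ (l : List String) (B : PySem.Dict Int (List String)) (F : PySem.Dict String Int)
      (t' : String),
    ((l.foldl (fun acc t =>
        if t ≠ "" then (acc.1.modify (PySem.Str.len t) [] (fun g => g ++ [t]), acc.2)
        else (acc.1, acc.2.insert t 0)) (B, F)).2).get? t' =
      if t' = "" ∧ "" ∈ l then some 0 else F.get? t' := by
  intro l
  induction l with
  | nil => intro B F t'; simp
  | cons t l ihl =>
    intro B F t'
    by_cases hte : t = ""
    · subst hte
      simp only [List.foldl_cons, ne_eq, not_true_eq_false, reduceIte, ihl]
      rw [PySem.Dict.get?_insert]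
      by_cases ht' : t' = ""
      · subst ht'
        simp
      · simp [ht']
    · simp only [List.foldl_cons, ne_eq, hte, not_false_eq_true, reduceIte, ihl]
      have : ("" ∈ t :: l) ↔ ("" ∈ l) := by
        simp [List.mem_cons]
        exact fun h => (hte h).elim
      simp only [this]

-- the grouping pass keeps group-dict keys distinct
theorem pvBInit_keys :
    ∀ (l : List String) (B : PySem.Dict Int (List String)) (F : PySem.Dict String Int),
    B.keys.Nodup →
    ((l.foldl (fun acc t =>
        if t ≠ "" then (acc.1.modify (PySem.Str.len t) [] (fun g => g ++ [t]), acc.2)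
        else (acc.1, acc.2.insert t 0)) (B, F)).1).keys.Nodup := by
  intro l
  induction l with
  | nil => intro B F h; exact h
  | cons t l ihl =>
    intro B F h
    rw [List.foldl_cons]
    by_cases hte : t = ""
    · subst hte
      simp only [ne_eq, not_true_eq_false, reduceIte]
      exact ihl _ _ h
    · simp only [ne_eq, hte, not_false_eq_true, reduceIte]
      apply ihl
      rw [PySem.Dict.keys_modify]
      exact PySem.Dict.nodup_keys_insert _ _ _ h

-- lowering keeps the length (B reads len(tl), A reads len(trigger))
theorem len_lower (s : String) : PySem.Str.len (PySem.Str.lower s) = PySem.Str.len s := by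
  rw [PySem.Str.len_eq, PySem.Str.len_eq, PySem.Str.toList_lower]
  simp [PySem.Chars.lower]

theorem str_find_nonneg_of_ne_neg_one (low tl : String) (h : PySem.Str.find low tl ≠ -1) :
    0 ≤ PySem.Str.find low tl := by
  rw [PySem.Str.find_eq] at h ⊢
  exact find_nonneg_of_ne_neg_one _ _ h

-- the two trigger loops agree when the dict holds exactly the find results
theorem loops_eq (text low : String) (first : PySem.Dict String Int) (limit : Int) :
    ∀ (triggers : List String) (out : List String),
      (∀ t ∈ triggers,
        first.get? (PySem.Str.lower t) =
          if PySem.Str.find low (PySem.Str.lower t) = -1 then none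
          else some (PySem.Str.find low (PySem.Str.lower t))) →
      pvALoop text low limit triggers out =
        pvBLoop text first limit (triggers.zip (triggers.map (fun t => PySem.Str.lower t))) out := by
  intro triggers
  induction triggers with
  | nil => intro out _; rfl
  | cons trigger rest ih =>
    intro out hdict
    have hd := hdict trigger (List.mem_cons_self)
    have hrest : ∀ t ∈ rest, first.get? (PySem.Str.lower t) =
        if PySem.Str.find low (PySem.Str.lower t) = -1 then none
        else some (PySem.Str.find low (PySem.Str.lower t)) :=
      fun t ht => hdict t (List.mem_cons_of_mem _ ht)
    simp only [List.map_cons, List.zip_cons_cons]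
    by_cases hneg : PySem.Str.find low (PySem.Str.lower trigger) = -1
    · have hd' : first.get? (PySem.Str.lower trigger) = none := by rw [hd, if_pos hneg]
      simp only [pvALoop, pvBLoop, hd']
      rw [if_pos (by omega : PySem.Str.find low (PySem.Str.lower trigger) < 0)]
      exact ih out hrest
    · have hnn : 0 ≤ PySem.Str.find low (PySem.Str.lower trigger) :=
        str_find_nonneg_of_ne_neg_one _ _ hneg
      have hd' : first.get? (PySem.Str.lower trigger) =
          some (PySem.Str.find low (PySem.Str.lower trigger)) := by rw [hd, if_neg hneg]
      simp only [pvALoop, pvBLoop, hd']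
      rw [if_neg (by omega : ¬ PySem.Str.find low (PySem.Str.lower trigger) < 0), len_lower]
      exact if_congr Iff.rfl rfl (ih _ hrest)


-- ===== VERDICT (by name: the statement is the Claim_ definition above) =====
theorem list_candidates_py_spec : Claim_equal_list_candidates_py := by
  intro text triggers limit _
  unfold Spec_list_candidates_py list_candidates_py list_candidates_py_alt
  apply loops_eq
  intro trig htrig
  set low := PySem.Str.lower text with hlow
  set t := PySem.Str.lower trig with htdef
  have htlows : t ∈ PySem.List.dedup (triggers.map (fun t => PySem.Str.lower t)) := by
    rw [PySem.List.mem_dedup]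
    exact List.mem_map_of_mem htrig
  set lowsD := PySem.List.dedup (triggers.map (fun t => PySem.Str.lower t)) with hlowsD
  have hBgetD : ∀ K, (pvBInit lowsD).1.getD K [] =
      lowsD.filter (fun s => decide (s ≠ "" ∧ PySem.Str.len s = K)) := by
    intro K
    unfold pvBInit
    rw [pvBInit_fst]
    simp
  have hBkeys : (pvBInit lowsD).1.keys.Nodup := by
    unfold pvBInit
    apply pvBInit_keys
    exact PySem.Dict.nodup_keys_empty
  have hFget : ∀ t', (pvBInit lowsD).2.get? t' =
      if t' = "" ∧ "" ∈ lowsD then some 0 else none := by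
    intro t'
    unfold pvBInit
    rw [pvBInit_snd]
    simp [PySem.Dict.get?_empty]
  by_cases hte : t = ""
  · -- the empty trigger: recorded at 0 by the grouping pass, untouched by the scan
    rw [hte]
    rw [pvBScan_not_mem low "" (low.toList.length) 0 _ _ (by omega) hBkeys ?_]
    · rw [hFget, if_pos ⟨rfl, hte ▸ htlows⟩]
      have hfind : PySem.Str.find low "" = 0 := by
        rw [PySem.Str.find_eq]
        have : ("" : String).toList = [] := rfl
        rw [this, find_empty]
      rw [hfind]
      norm_num
    · intro L hmem
      rw [hBgetD] at hmem
      have := List.of_mem_filter hmem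
      simp at this
  · have htl : t.toList ≠ [] := fun h => hte (String.toList_inj.mp (by rw [h]; rfl))
    have hK : t ∈ (pvBInit lowsD).1.getD ((t.toList.length : Int)) [] := by
      rw [hBgetD]
      apply List.mem_filter.mpr
      refine ⟨htlows, ?_⟩
      simp [hte, PySem.Str.len_eq]
    have honly : ∀ L, L ≠ ((t.toList.length : Int)) →
        t ∉ (pvBInit lowsD).1.getD L [] := by
      intro L hL hmem
      rw [hBgetD] at hmem
      have := List.of_mem_filter hmem
      simp [PySem.Str.len_eq] at this
      exact hL this.2.symm
    have hvnd : ∀ L, ((pvBInit lowsD).1.getD L []).Nodup := by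
      intro L
      rw [hBgetD]
      exact List.Nodup.filter _ (PySem.List.nodup_dedup _)
    have hnone : (pvBInit lowsD).2.get? t = none := by
      rw [hFget, if_neg (fun h => hte h.1)]
    rw [pvBScan_get? low t htl (low.toList.length) 0 _ _ (by omega) hBkeys hvnd hK honly hnone
      (fun j hj => absurd hj (by omega))]
    rw [PySem.Str.find_eq]
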